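-- pv_equiv track=rewrite | github.com/Sagar03111997/IUB_MSCS_SEM1_ASSIGNMENTS | Applied_algorithms/Assignment 10/Problem3.py | custom_dict
-- ===== SOURCE A (Python) =====
-- def custom_dict(queries, values):
--     result_dict = {}
--     key, value = 0, 0
--     result = []
--     for i in range(len(queries)):
--         if queries[i] == "Add":
--             result_dict[values[i][0]-key] = values[i][1] - value
--         elif queries[i] == "Return":
--             result.append(result_dict[values[i][0]-key] + value)
--         elif queries[i] == "Add_to_keys":
--             key += values[i][0]
--         elif queries[i] == "Add_to_vals":
--             value += values[i][0]
--     return result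
-- ===== SOURCE B (Python) =====
-- def custom_dict(queries, values):
--     d = {}
--     result = []
--     for q, v in zip(queries, values):
--         if q == "Add":
--             d[v[0]] = v[1]
--         elif q == "Return":
--             result.append(d[v[0]])
--         elif q == "Add_to_keys":
--             d = {k + v[0]: val for k, val in d.items()}
--         elif q == "Add_to_vals":
--             d = {k: val + v[0] for k, val in d.items()}
--     return result
-- ===== Notes on version B (the rewrite author's own statement) =====
-- stated objective: simpler
-- what changed: B drops A's lazy key/value offset bookkeeping and maintains the dictionary eagerly in actual key/value space, rebuilding it by comprehension on each shift query and iterating query/value pairs with zip instead of indexing by range(len(queries)).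
import Mathlib
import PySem

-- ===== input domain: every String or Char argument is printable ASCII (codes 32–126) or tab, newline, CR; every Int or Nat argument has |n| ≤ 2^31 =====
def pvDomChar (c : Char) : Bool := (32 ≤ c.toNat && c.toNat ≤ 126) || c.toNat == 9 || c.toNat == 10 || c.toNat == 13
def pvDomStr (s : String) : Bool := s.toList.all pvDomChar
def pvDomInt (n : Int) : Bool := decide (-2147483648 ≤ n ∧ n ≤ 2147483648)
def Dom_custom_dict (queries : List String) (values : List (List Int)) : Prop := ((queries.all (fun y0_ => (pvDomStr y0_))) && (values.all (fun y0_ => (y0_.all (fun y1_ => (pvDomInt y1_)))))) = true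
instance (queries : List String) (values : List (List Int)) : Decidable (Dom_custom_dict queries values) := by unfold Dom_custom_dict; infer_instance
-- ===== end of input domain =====

-- B maintains the dict eagerly in actual key/value space (rebuilding it on each shift query)
-- instead of A's lazy key/value offsets; objective: simpler. Return-value equivalence only.

-- ===== PORT A =====
-- loop body of A, over the current query string and its values row
def stepA (st : PySem.Dict Int Int × Int × Int × List Int) (q : String) (v : List Int) :
    PySem.Dict Int Int × Int × Int × List Int :=
  if q = "Add" then
    (st.1.insert (PySem.List.pyGetD v 0 0 - st.2.1) (PySem.List.pyGetD v 1 0 - st.2.2.1),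
     st.2.1, st.2.2.1, st.2.2.2)
  else if q = "Return" then
    (st.1, st.2.1, st.2.2.1,
     st.2.2.2 ++ [st.1.getD (PySem.List.pyGetD v 0 0 - st.2.1) 0 + st.2.2.1])
  else if q = "Add_to_keys" then
    (st.1, st.2.1 + PySem.List.pyGetD v 0 0, st.2.2.1, st.2.2.2)
  else if q = "Add_to_vals" then
    (st.1, st.2.1, st.2.2.1 + PySem.List.pyGetD v 0 0, st.2.2.2)
  else st

def custom_dict (queries : List String) (values : List (List Int)) : List Int :=
  ((PySem.List.pyRange 0 (PySem.List.len queries) 1).foldl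
    (fun st i => stepA st (PySem.List.pyGetD queries i "") (PySem.List.pyGetD values i []))
    (PySem.Dict.mk [], 0, 0, [])).2.2.2

-- ===== PORT B =====
-- loop body of B, over one (query, values-row) pair from zip
def stepB (st : PySem.Dict Int Int × List Int) (p : String × List Int) :
    PySem.Dict Int Int × List Int :=
  if p.1 = "Add" then
    (st.1.insert (PySem.List.pyGetD p.2 0 0) (PySem.List.pyGetD p.2 1 0), st.2)
  else if p.1 = "Return" then
    (st.1, st.2 ++ [st.1.getD (PySem.List.pyGetD p.2 0 0) 0])
  else if p.1 = "Add_to_keys" then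
    (PySem.Dict.mk (st.1.items.map (fun kv => (kv.1 + PySem.List.pyGetD p.2 0 0, kv.2))), st.2)
  else if p.1 = "Add_to_vals" then
    (PySem.Dict.mk (st.1.items.map (fun kv => (kv.1, kv.2 + PySem.List.pyGetD p.2 0 0))), st.2)
  else st

def custom_dict_alt (queries : List String) (values : List (List Int)) : List Int :=
  ((queries.zip values).foldl stepB (PySem.Dict.mk [], [])).2

-- ===== PRECONDITION & SPEC =====
-- the accumulated key offset just before step i (sum of earlier Add_to_keys shifts)
def keyOffAux (qs : List String) (vs : List (List Int)) (i : Nat) : Int :=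
  (((qs.take i).zip (vs.take i)).map (fun p => if p.1 = "Add_to_keys" then p.2.getD 0 0 else 0)).sum

-- every recognized query has its values row (long enough), and every Return key was stored
-- before (by a prior Add, compared in A's shifted key space, relative to start keys0/key)
def PreRel (qs : List String) (vs : List (List Int)) (keys0 : List Int) (key : Int) : Prop :=
  ∀ i, i < qs.length →
    (qs.getD i "" = "Add" → i < vs.length ∧ 2 ≤ (vs.getD i []).length) ∧
    ((qs.getD i "" = "Return" ∨ qs.getD i "" = "Add_to_keys" ∨ qs.getD i "" = "Add_to_vals") →
      i < vs.length ∧ 1 ≤ (vs.getD i []).length) ∧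
    (qs.getD i "" = "Return" →
      ((vs.getD i []).getD 0 0 - (key + keyOffAux qs vs i)) ∈ keys0 ∨
      ∃ j, j < i ∧ qs.getD j "" = "Add" ∧
        (vs.getD j []).getD 0 0 - (key + keyOffAux qs vs j) =
          (vs.getD i []).getD 0 0 - (key + keyOffAux qs vs i))

-- Pre_ = exactly the inputs on which A returns: each recognized query finds its values row
-- (else IndexError) and each Return key is present (else KeyError)
def Pre_custom_dict (queries : List String) (values : List (List Int)) : Prop :=
  PreRel queries values [] 0

instance (queries : List String) (values : List (List Int)) : Decidable (Pre_custom_dict queries values) := by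
  unfold Pre_custom_dict PreRel; infer_instance

def pvWitness_custom_dict : List String × List (List Int) :=
  (["Add", "Add_to_keys", "Return"], [[1, 5], [2], [3]])

def Spec_custom_dict (queries : List String) (values : List (List Int)) (out : List Int) : Prop := out = custom_dict_alt queries values
instance (queries : List String) (values : List (List Int)) (out : List Int) : Decidable (Spec_custom_dict queries values out) := by unfold Spec_custom_dict; infer_instance

-- ===== CLAIM (what is proved, stated in full; the proofs are below) =====
def Claim_equal_custom_dict : Prop := ∀ (queries : List String) (values : List (List Int)), Dom_custom_dict queries values → Pre_custom_dict queries values → Spec_custom_dict queries values (custom_dict queries values)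

-- ===== LEMMAS AND PROOFS =====

def aRun : List String → List (List Int) → PySem.Dict Int Int × Int × Int × List Int →
    PySem.Dict Int Int × Int × Int × List Int
  | [], _, st => st
  | q :: qs, vs, st => aRun qs vs.tail (stepA st q (vs.headD []))

theorem keyOffAux_zero (qs : List String) (vs : List (List Int)) : keyOffAux qs vs 0 = 0 := by
  simp [keyOffAux]

theorem keyOffAux_cons (q : String) (qs : List String) (v : List Int) (vs : List (List Int)) (i : Nat) :
    keyOffAux (q :: qs) (v :: vs) (i + 1) =
      (if q = "Add_to_keys" then v.getD 0 0 else 0) + keyOffAux qs vs i := by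
  simp [keyOffAux, List.take_succ_cons]

theorem PreRel_mono {qs : List String} {vs : List (List Int)} {K K' : List Int} {key : Int}
    (hsub : ∀ x, x ∈ K → x ∈ K') (h : PreRel qs vs K key) : PreRel qs vs K' key := by
  intro i hi
  obtain ⟨c1, c2, c3⟩ := h i hi
  refine ⟨c1, c2, fun hr => ?_⟩
  rcases c3 hr with hm | he
  · exact Or.inl (hsub _ hm)
  · exact Or.inr he

theorem PreRel_peel {q : String} {qs : List String} {v : List Int} {vs : List (List Int)}
    {K : List Int} {key : Int} (h : PreRel (q :: qs) (v :: vs) K key) :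
    PreRel qs vs (if q = "Add" then (v.getD 0 0 - key) :: K else K)
      (key + (if q = "Add_to_keys" then v.getD 0 0 else 0)) := by
  intro i hi
  obtain ⟨c1, c2, c3⟩ := h (i + 1) (by simpa using Nat.succ_lt_succ hi)
  simp only [List.getD_cons_succ, List.length_cons] at c1 c2 c3
  refine ⟨fun ha => ?_, fun hr => ?_, fun hr => ?_⟩
  · obtain ⟨hl, hv⟩ := c1 ha
    exact ⟨by omega, by simpa using hv⟩
  · obtain ⟨hl, hv⟩ := c2 hr
    exact ⟨by omega, by simpa using hv⟩
  · rcases c3 hr with hm | ⟨j, hj, hAdd, heq⟩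
    · rw [keyOffAux_cons] at hm
      left
      split
      · exact List.mem_cons_of_mem _ (by convert hm using 2; ring)
      · convert hm using 2; ring
    · cases j with
      | zero =>
        simp only [List.getD_cons_zero] at hAdd heq
        subst hAdd
        rw [keyOffAux_zero, keyOffAux_cons] at heq
        left
        rw [if_pos rfl]
        refine List.mem_cons.2 (Or.inl ?_)
        rw [if_neg (by decide)] at heq ⊢
        omega
      | succ j' =>
        right
        refine ⟨j', by omega, by simpa using hAdd, ?_⟩
        rw [keyOffAux_cons, keyOffAux_cons] at heq
        simp only [List.getD_cons_succ] at hAdd heq ⊢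
        convert heq using 2 <;> ring

theorem PreRel_peel_nil {q : String} {qs : List String} {K : List Int} {key : Int}
    (h : PreRel (q :: qs) [] K key) :
    (q ≠ "Add" ∧ q ≠ "Return" ∧ q ≠ "Add_to_keys" ∧ q ≠ "Add_to_vals") ∧ PreRel qs [] K key := by
  obtain ⟨c1, c2, _⟩ := h 0 (by simp)
  simp only [List.getD_cons_zero, List.length_nil] at c1 c2
  refine ⟨⟨fun hq => by simpa using (c1 hq).1, fun hq => by simpa using (c2 (Or.inl hq)).1,
    fun hq => by simpa using (c2 (Or.inr (Or.inl hq))).1,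
    fun hq => by simpa using (c2 (Or.inr (Or.inr hq))).1⟩, ?_⟩
  intro i hi
  obtain ⟨c1', c2', _⟩ := h (i + 1) (by simpa using Nat.succ_lt_succ hi)
  simp only [List.getD_cons_succ, List.length_nil] at c1' c2'
  refine ⟨fun ha => by simpa using (c1' ha).1, fun hr => by simpa using (c2' hr).1, fun hr => ?_⟩
  exact absurd (c2' (Or.inl hr)).1 (by omega)

theorem aRun_nil_vals : ∀ (qs : List String) {K : List Int} {key : Int}
    (d : PySem.Dict Int Int) (value : Int) (res : List Int),
    PreRel qs [] K key → aRun qs [] (d, key, value, res) = (d, key, value, res) := by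
  intro qs
  induction qs with
  | nil => intro K key d value res _; rfl
  | cons q qs ih =>
    intro K key d value res h
    obtain ⟨⟨h1, h2, h3, h4⟩, htail⟩ := PreRel_peel_nil h
    show aRun qs [] (stepA (d, key, value, res) q []) = _
    rw [show stepA (d, key, value, res) q [] = (d, key, value, res) by simp [stepA, h1, h2, h3, h4]]
    exact ih d value res htail

def shiftD (a b : Int) (d : PySem.Dict Int Int) : PySem.Dict Int Int :=
  PySem.Dict.mk (d.items.map (fun p => (p.1 + a, p.2 + b)))

theorem find?_shift (l : List (Int × Int)) (a b x : Int) :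
    ((l.map (fun p => (p.1 + a, p.2 + b))).find? (fun p => p.1 == x + a)) =
      (l.find? (fun p => p.1 == x)).map (fun p => (p.1 + a, p.2 + b)) := by
  induction l with
  | nil => simp
  | cons p l ih =>
    by_cases h : p.1 = x
    · simp [List.find?_cons, h]
    · have h' : (p.1 + a == x + a) = false := by simp; omega
      have h'' : (p.1 == x) = false := by simp [h]
      simp [List.find?_cons, h', h'', ih]

theorem get?_shiftD (d : PySem.Dict Int Int) (a b x : Int) :
    (shiftD a b d).get? (x + a) = (d.get? x).map (· + b) := by
  simp only [PySem.Dict.get?]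
  rw [show (shiftD a b d).items = d.items.map (fun p => (p.1 + a, p.2 + b)) from rfl]
  rw [find?_shift]
  cases h : List.find? (fun p => p.1 == x) d.items <;> simp [h]

theorem contains_shiftD (d : PySem.Dict Int Int) (a b x : Int) :
    (shiftD a b d).contains (x + a) = d.contains x := by
  rw [PySem.Dict.contains_eq_isSome_get?, PySem.Dict.contains_eq_isSome_get?, get?_shiftD]
  cases d.get? x <;> simp

theorem insert_shiftD (d : PySem.Dict Int Int) (a b x y : Int) :
    (shiftD a b d).insert (x + a) (y + b) = shiftD a b (d.insert x y) := by
  apply PySem.Dict.ext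
  rw [PySem.Dict.items_insert, contains_shiftD]
  show _ = (PySem.Dict.insert d x y).items.map _
  rw [PySem.Dict.items_insert]
  by_cases h : d.contains x
  · simp only [h, if_true]
    show (d.items.map _).map _ = _
    rw [List.map_map, List.map_map]
    apply List.map_congr_left
    intro p _
    by_cases hp : p.1 = x
    · simp [Function.comp, hp]
    · have : (p.1 + a == x + a) = false := by simp; omega
      simp [Function.comp, hp, this]
  · simp only [h, if_false, Bool.false_eq_true]
    show (d.items.map _) ++ _ = (d.items ++ [(x, y)]).map _
    simp

theorem pyGetD_zero (v : List Int) : PySem.List.pyGetD v 0 0 = v.getD 0 0 := by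
  rw [PySem.List.pyGetD_of_nonneg _ _ (by norm_num)]; rfl

theorem pyGetD_one (v : List Int) : PySem.List.pyGetD v 1 0 = v.getD 1 0 := by
  rw [PySem.List.pyGetD_of_nonneg _ _ (by norm_num)]; rfl

theorem bridgeA (queries : List String) (values : List (List Int)) :
    ∀ (k s : Nat) (st : PySem.Dict Int Int × Int × Int × List Int), s + k = queries.length →
    (PySem.List.pyRange (s : Int) (PySem.List.len queries) 1).foldl
      (fun st i => stepA st (PySem.List.pyGetD queries i "") (PySem.List.pyGetD values i []))
      st = aRun (queries.drop s) (values.drop s) st := by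
  intro k
  induction k with
  | zero =>
    intro s st hs
    rw [PySem.List.pyRange_one_eq_nil (by simp [PySem.List.len_eq]; omega)]
    rw [List.drop_eq_nil_of_le (by omega)]
    simp [aRun]
  | succ k ih =>
    intro s st hs
    have hlt : s < queries.length := by omega
    rw [PySem.List.pyRange_one_cons (by simp [PySem.List.len_eq]; exact_mod_cast hlt)]
    simp only [List.foldl_cons]
    have hcast : ((s : Int) + 1) = ((s + 1 : Nat) : Int) := by push_cast; ring
    rw [hcast, ih (s+1) _ (by omega)]
    rw [List.drop_eq_getElem_cons hlt]
    simp only [aRun, List.tail_drop]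
    have h1 : PySem.List.pyGetD queries (s : Int) "" = queries[s] := by
      rw [PySem.List.pyGetD_of_nonneg _ _ (by positivity)]
      simp [List.getD_eq_getElem?_getD, List.getElem?_eq_getElem hlt]
    have h2 : PySem.List.pyGetD values (s : Int) [] = (values.drop s).headD [] := by
      rw [PySem.List.pyGetD_of_nonneg _ _ (by positivity)]
      simp [List.headD_eq_head?_getD, List.head?_drop, List.getD_eq_getElem?_getD]
    rw [h1, h2]

theorem main_lemma : ∀ (qs : List String) (vs : List (List Int)) (d : PySem.Dict Int Int)
    (key value : Int) (res : List Int), PreRel qs vs d.keys key →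
    ((qs.zip vs).foldl stepB (shiftD key value d, res)).2 = (aRun qs vs (d, key, value, res)).2.2.2 := by
  intro qs
  induction qs with
  | nil => intro vs d key value res _; rfl
  | cons q qs ih =>
    intro vs d key value res h
    cases vs with
    | nil =>
      rw [aRun_nil_vals (q :: qs) d value res h]
      simp [List.zip_nil_right]
    | cons v vs =>
      show ((qs.zip vs).foldl stepB (stepB (shiftD key value d, res) (q, v))).2 =
        (aRun qs vs (stepA (d, key, value, res) q v)).2.2.2
      have hpeel := PreRel_peel h
      by_cases hA : q = "Add"
      · subst hA
        rw [if_pos rfl, if_neg (by decide)] at hpeel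
        rw [add_zero] at hpeel
        rw [show stepB (shiftD key value d, res) ("Add", v) =
              (shiftD key value (d.insert (v.getD 0 0 - key) (v.getD 1 0 - value)), res) by
            simp only [stepB, pyGetD_zero, pyGetD_one, String.reduceEq, reduceIte]
            rw [← insert_shiftD]
            congr 3 <;> ring]
        rw [show stepA (d, key, value, res) "Add" v =
              (d.insert (v.getD 0 0 - key) (v.getD 1 0 - value), key, value, res) by
            simp only [stepA, pyGetD_zero, pyGetD_one, String.reduceEq, reduceIte]]
        refine ih vs _ key value res (PreRel_mono (fun x hx => ?_) hpeel)
        rcases List.mem_cons.1 hx with hx | hx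
        · exact (PySem.Dict.mem_keys_insert _ _ _ _).2 (Or.inl hx)
        · exact (PySem.Dict.mem_keys_insert _ _ _ _).2 (Or.inr hx)
      · by_cases hR : q = "Return"
        · subst hR
          rw [if_neg (by decide), if_neg (by decide)] at hpeel
          rw [add_zero] at hpeel
          obtain ⟨_, _, c3⟩ := h 0 (by simp)
          replace c3 := c3 (by simp)
          simp only [List.getD_cons_zero, keyOffAux_zero] at c3
          have hmem : (v.getD 0 0 - key) ∈ d.keys := by
            rcases c3 with hm | ⟨j, hj, _⟩
            · simpa using hm
            · omega
          obtain ⟨w, hw⟩ : ∃ w, d.get? (v.getD 0 0 - key) = some w := by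
            cases hget : d.get? (v.getD 0 0 - key) with
            | none => exact absurd hmem ((PySem.Dict.get?_eq_none_iff_not_mem_keys _ _).1 hget)
            | some w => exact ⟨w, rfl⟩
          rw [show stepB (shiftD key value d, res) ("Return", v) =
                (shiftD key value d, res ++ [w + value]) by
              simp only [stepB, pyGetD_zero, String.reduceEq, reduceIte]
              have hg : (shiftD key value d).get? (v.getD 0 0) = some (w + value) := by
                rw [show v.getD 0 0 = (v.getD 0 0 - key) + key by ring, get?_shiftD, hw]; rfl
              rw [PySem.Dict.getD_eq_get?_getD, hg]
              rfl]
          rw [show stepA (d, key, value, res) "Return" v =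
                (d, key, value, res ++ [w + value]) by
              simp only [stepA, pyGetD_zero, String.reduceEq, reduceIte]
              rw [PySem.Dict.getD_eq_get?_getD, hw]
              rfl]
          exact ih vs d key value (res ++ [w + value]) hpeel
        · by_cases hK : q = "Add_to_keys"
          · subst hK
            rw [if_neg (by decide), if_pos rfl] at hpeel
            rw [show stepB (shiftD key value d, res) ("Add_to_keys", v) =
                  (shiftD (key + v.getD 0 0) value d, res) by
                simp only [stepB, pyGetD_zero, String.reduceEq, reduceIte]
                refine congrArg (fun x => (x, res)) ?_
                apply PySem.Dict.ext
                show ((d.items.map _).map _) = d.items.map _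
                rw [List.map_map]
                apply List.map_congr_left
                intro p _
                simp only [Function.comp, Prod.mk.injEq]
                exact ⟨by ring, trivial⟩]
            rw [show stepA (d, key, value, res) "Add_to_keys" v =
                  (d, key + v.getD 0 0, value, res) by
                simp only [stepA, pyGetD_zero, String.reduceEq, reduceIte]]
            exact ih vs d (key + v.getD 0 0) value res hpeel
          · by_cases hV : q = "Add_to_vals"
            · subst hV
              rw [if_neg (by decide), if_neg (by decide)] at hpeel
              rw [add_zero] at hpeel
              rw [show stepB (shiftD key value d, res) ("Add_to_vals", v) =
                    (shiftD key (value + v.getD 0 0) d, res) by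
                  simp only [stepB, pyGetD_zero, String.reduceEq, reduceIte]
                  refine congrArg (fun x => (x, res)) ?_
                  apply PySem.Dict.ext
                  show ((d.items.map _).map _) = d.items.map _
                  rw [List.map_map]
                  apply List.map_congr_left
                  intro p _
                  simp only [Function.comp, Prod.mk.injEq]
                  exact ⟨trivial, by ring⟩]
              rw [show stepA (d, key, value, res) "Add_to_vals" v =
                    (d, key, value + v.getD 0 0, res) by
                  simp only [stepA, pyGetD_zero, String.reduceEq, reduceIte]]
              exact ih vs d key (value + v.getD 0 0) res hpeel
            · rw [if_neg hA, if_neg hK] at hpeel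
              rw [add_zero] at hpeel
              rw [show stepB (shiftD key value d, res) (q, v) = (shiftD key value d, res) by
                  simp only [stepB]
                  rw [if_neg hA, if_neg hR, if_neg hK, if_neg hV]]
              rw [show stepA (d, key, value, res) q v = (d, key, value, res) by
                  simp only [stepA]
                  rw [if_neg hA, if_neg hR, if_neg hK, if_neg hV]]
              exact ih vs d key value res hpeel

-- ===== VERDICT (by name: the statement is the Claim_ definition above) =====
theorem custom_dict_spec : Claim_equal_custom_dict := by
  intro queries values _ hpre
  unfold Spec_custom_dict custom_dict custom_dict_alt
  have hb := bridgeA queries values queries.length 0 (PySem.Dict.mk [], 0, 0, []) (by omega)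
  simp only [Nat.cast_zero] at hb
  rw [hb]
  simp only [List.drop_zero]
  have hm := main_lemma queries values (PySem.Dict.mk []) 0 0 [] (by simpa [PySem.Dict.keys] using hpre)
  have hsh : shiftD 0 0 (PySem.Dict.mk []) = (PySem.Dict.mk [] : PySem.Dict Int Int) := by
    simp [shiftD]
  rw [hsh] at hm
  exact hm.symm
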